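-- pv_equiv track=rewrite | github.com/juliciy/oil_pipeline_optimization | main.py | remove_comments_and_leading_spaces
-- ===== SOURCE A (Python) =====
-- def remove_comments_and_leading_spaces(text):
--     lines = text.split('\n')  # 按行分割文本
--     processed_lines = []  # 用于存储处理后的行
--
--     for line in lines:
--         # 如果行中存在"#"符号，仅保留"#"之前的内容，并去除尾部空格
--         if "#" in line:
--             line = line.split("#")[0].rstrip()
--         # 添加处理后的行到列表中
--         processed_lines.append(line)
--
--     # 将处理后的行重新组合为字符串并返回
--     return '\n'.join(processed_lines)
-- ===== SOURCE B (Python) =====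
-- def remove_comments_and_leading_spaces(text):
--     # Single left-to-right pass over the characters: no line splitting, no rejoin.
--     # Non-newline whitespace is buffered; it is emitted only when followed (on the
--     # same line) by a non-whitespace, non-'#' character or by the line's end with
--     # no '#' seen, which reproduces split('#')[0].rstrip() on commented lines and
--     # leaves uncommented lines untouched.
--     out = []
--     pending = []          # run of non-newline whitespace not yet known to be kept
--     in_comment = False    # a '#' was seen on the current line
--     for ch in text:
--         if ch == '\n':
--             if not in_comment:
--                 out.extend(pending)
--             pending = []
--             in_comment = False
--             out.append(ch)
--         elif in_comment:
--             continue
--         elif ch == '#':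
--             pending = []
--             in_comment = True
--         elif ch.isspace():
--             pending.append(ch)
--         else:
--             out.extend(pending)
--             pending = []
--             out.append(ch)
--     if not in_comment:
--         out.extend(pending)
--     return ''.join(out)
-- ===== Notes on version B (the rewrite author's own statement) =====
-- stated objective: alternative
-- what changed: Replaces split-into-lines / per-line split('#') + rstrip + rejoin with a single character-level state-machine pass that buffers whitespace runs and drops comment tails in place.
import Mathlib
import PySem

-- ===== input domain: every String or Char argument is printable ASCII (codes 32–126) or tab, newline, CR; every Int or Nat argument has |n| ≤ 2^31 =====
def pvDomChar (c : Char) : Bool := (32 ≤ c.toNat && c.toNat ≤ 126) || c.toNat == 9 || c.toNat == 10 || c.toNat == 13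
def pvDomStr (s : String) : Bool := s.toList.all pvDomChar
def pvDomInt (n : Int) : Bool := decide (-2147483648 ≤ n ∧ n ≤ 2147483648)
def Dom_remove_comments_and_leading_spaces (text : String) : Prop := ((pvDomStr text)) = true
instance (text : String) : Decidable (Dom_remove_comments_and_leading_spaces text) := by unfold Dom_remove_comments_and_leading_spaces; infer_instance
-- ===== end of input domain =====

-- B replaces A's split-into-lines / per-line split('#')+rstrip / rejoin with a single
-- character-level state-machine pass (alternative decomposition, same O(n) cost).

-- ===== PORT A =====
-- lines = text.split('\n'); for line in lines: if "#" in line: line = line.split("#")[0].rstrip();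
-- processed_lines.append(line); return '\n'.join(processed_lines)
def remove_comments_and_leading_spaces (text : String) : String :=
  let lines := PySem.Chars.splitOn text.toList ['\n']
  let processed : List (List Char) :=
    lines.foldl (fun acc line =>
      acc ++ [if PySem.Chars.isIn ['#'] line
              then PySem.Chars.rstrip ((PySem.Chars.splitOn line ['#']).headI)
              else line]) []
  String.ofList (PySem.Chars.join ['\n'] processed)

-- ===== PORT B =====
-- the for-loop of Source B as structural recursion; state = (pending, in_comment), the
-- recursion's result is the `out` suffix produced from this point on
def scanB : List Char → List Char → Bool → List Char
  | [], pend, inC => if inC then [] else pend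
  | c :: rest, pend, inC =>
    if c = '\n' then
      (if inC then [] else pend) ++ '\n' :: scanB rest [] false
    else if inC then
      scanB rest pend inC
    else if c = '#' then
      scanB rest [] true
    else if PySem.Chars.isspace c then
      scanB rest (pend ++ [c]) false
    else
      pend ++ c :: scanB rest [] false

def remove_comments_and_leading_spaces_alt (text : String) : String :=
  String.ofList (scanB text.toList [] false)

-- ===== PRECONDITION & SPEC =====
def Spec_remove_comments_and_leading_spaces (text : String) (out : String) : Prop := out = remove_comments_and_leading_spaces_alt text
instance (text : String) (out : String) : Decidable (Spec_remove_comments_and_leading_spaces text out) := by unfold Spec_remove_comments_and_leading_spaces; infer_instance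

-- ===== CLAIM (what is proved, stated in full; the proofs are below) =====
def Claim_equal_remove_comments_and_leading_spaces : Prop := ∀ (text : String), Dom_remove_comments_and_leading_spaces text → Spec_remove_comments_and_leading_spaces text (remove_comments_and_leading_spaces text)

-- ===== LEMMAS AND PROOFS =====

-- reference splitter: split on a single character (proved equal to PySem.Chars.splitOn · [c])
def splitCh (c : Char) : List Char → List (List Char)
  | [] => [[]]
  | a :: rest =>
    if a = c then [] :: splitCh c rest
    else
      match splitCh c rest with
      | [] => [[a]]
      | h :: t => (a :: h) :: t

def consHead (p : List Char) : List (List Char) → List (List Char)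
  | [] => [p]
  | h :: t => (p ++ h) :: t

-- A's per-line transformation, in takeWhile form
def lineA (l : List Char) : List Char :=
  if PySem.Chars.isIn ['#'] l then
    PySem.Chars.rstrip (l.takeWhile (fun a => !(a == '#')))
  else l

lemma splitCh_ne_nil (c : Char) (l : List Char) : splitCh c l ≠ [] := by
  cases l with
  | nil => simp [splitCh]
  | cons a rest =>
    simp only [splitCh]
    split
    · simp
    · cases h : splitCh c rest <;> simp

lemma go_eq (c : Char) : ∀ (fuel : Nat) (l cur : List Char) (acc : List (List Char)),
    l.length < fuel →
    PySem.Chars.splitOn.go [c] fuel l cur acc =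
      acc.reverse ++ consHead cur.reverse (splitCh c l) := by
  intro fuel
  induction fuel with
  | zero => intro l cur acc h; omega
  | succ f ih =>
    intro l cur acc h
    cases l with
    | nil =>
      simp [PySem.Chars.splitOn.go, splitCh, consHead]
    | cons a rest =>
      by_cases hac : a = c
      · subst hac
        have hpre : List.isPrefixOf [a] (a :: rest) = true := by
          simp [List.isPrefixOf]
        have hrec := ih rest [] (cur.reverse :: acc) (by simpa using Nat.lt_of_succ_lt_succ h)
        simp only [PySem.Chars.splitOn.go, hpre, if_pos]
        simp only [List.length_cons, List.length_nil, List.drop_succ_cons, List.drop_zero]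
        rw [hrec]
        have hnn := splitCh_ne_nil a rest
        cases hsp : splitCh a rest with
        | nil => exact absurd hsp hnn
        | cons hh tt =>
          simp [splitCh, consHead, hsp]
      · have hpre : List.isPrefixOf [c] (a :: rest) = false := by
          simp [List.isPrefixOf]
          exact fun hh => absurd hh.symm hac
        have hrec := ih rest (a :: cur) acc (by simpa using Nat.lt_of_succ_lt_succ h)
        simp only [PySem.Chars.splitOn.go, hpre]
        simp only [Bool.false_eq_true, if_false]
        rw [hrec]
        have hnn := splitCh_ne_nil c rest
        cases hsp : splitCh c rest with
        | nil => exact absurd hsp hnn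
        | cons hh tt =>
          simp [splitCh, consHead, hsp, hac]

lemma splitOn_eq_splitCh (c : Char) (l : List Char) :
    PySem.Chars.splitOn l [c] = splitCh c l := by
  have := go_eq c (l.length + 1) l [] [] (by omega)
  simp only [List.reverse_nil, List.nil_append] at this
  unfold PySem.Chars.splitOn
  rw [this]
  have hnn := splitCh_ne_nil c l
  cases hsp : splitCh c l with
  | nil => exact absurd hsp hnn
  | cons h t => simp [consHead]

lemma headI_splitCh (c : Char) (l : List Char) :
    (splitCh c l).headI = l.takeWhile (fun a => !(a == c)) := by
  induction l with
  | nil => simp [splitCh]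
  | cons a rest ih =>
    by_cases hac : a = c
    · subst hac; simp [splitCh, List.takeWhile]
    · have hnn := splitCh_ne_nil c rest
      cases hsp : splitCh c rest with
      | nil => exact absurd hsp hnn
      | cons h t =>
        simp only [splitCh, hac, if_false, hsp, List.takeWhile]
        simp only [hsp] at ih
        simp only [List.headI] at ih
        have hbc : (a == c) = false := beq_eq_false_iff_ne.mpr hac
        simp [hbc, ih]

lemma isIn_singleton (c : Char) (l : List Char) :
    PySem.Chars.isIn [c] l = true ↔ c ∈ l := by
  rw [PySem.Chars.isIn_iff_infix]
  constructor
  · rintro ⟨s, t, rfl⟩; simp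
  · intro h
    obtain ⟨s, t, rfl⟩ := List.append_of_mem h
    exact ⟨s, t, by simp⟩

lemma isIn_singleton_false (c : Char) (l : List Char) (h : c ∉ l) :
    PySem.Chars.isIn [c] l = false := by
  cases hb : PySem.Chars.isIn [c] l with
  | false => rfl
  | true => exact absurd ((isIn_singleton c l).mp hb) h

lemma rstrip_all_space (l : List Char) (h : ∀ x ∈ l, PySem.Chars.isspace x = true) :
    PySem.Chars.rstrip l = [] := by
  unfold PySem.Chars.rstrip
  have : l.reverse.dropWhile PySem.Chars.isspace = [] := by
    rw [List.dropWhile_eq_nil_iff]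
    intro x hx
    exact h x (List.mem_reverse.mp hx)
  rw [this]; rfl

lemma dropWhile_append_cons_neg {p : Char → Bool} (a : Char) (ha : p a = false) :
    ∀ (u v : List Char), (u ++ a :: v).dropWhile p = u.dropWhile p ++ a :: v := by
  intro u
  induction u with
  | nil => intro v; simp [List.dropWhile, ha]
  | cons x u' ih =>
    intro v
    simp only [List.cons_append, List.dropWhile]
    cases hx : p x with
    | true => simpa using ih v
    | false => simp

lemma rstrip_append_cons (a : Char) (ha : PySem.Chars.isspace a = false)
    (u v : List Char) :
    PySem.Chars.rstrip (u ++ a :: v) = u ++ a :: PySem.Chars.rstrip v := by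
  unfold PySem.Chars.rstrip
  have : (u ++ a :: v).reverse = v.reverse ++ a :: u.reverse := by simp
  rw [this, dropWhile_append_cons_neg a ha]
  simp

lemma takeWhile_append_all {p : Char → Bool} (u w : List Char)
    (hu : ∀ x ∈ u, p x = true) :
    (u ++ w).takeWhile p = u ++ w.takeWhile p := by
  induction u with
  | nil => simp
  | cons x u' ih =>
    simp only [List.cons_append, List.takeWhile, hu x (by simp)]
    simp [ih (fun x hx => hu x (by simp [hx]))]

lemma hash_not_space : PySem.Chars.isspace '#' = false := by decide

-- whitespace-only prefixes are left untouched by lineA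
lemma lineA_ws (pend : List Char)
    (hp : ∀ x ∈ pend, PySem.Chars.isspace x = true) :
    lineA pend = pend := by
  unfold lineA
  have : PySem.Chars.isIn ['#'] pend = false := by
    apply isIn_singleton_false
    intro hmem
    exact absurd (hp _ hmem) (by simp [hash_not_space])
  simp [this]

lemma lineA_hash (pend l : List Char)
    (hp : ∀ x ∈ pend, PySem.Chars.isspace x = true) :
    lineA (pend ++ '#' :: l) = [] := by
  unfold lineA
  have hpn : ∀ x ∈ pend, x ≠ '#' := fun x hx h => by
    subst h; exact absurd (hp _ hx) (by simp [hash_not_space])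
  have hin : PySem.Chars.isIn ['#'] (pend ++ '#' :: l) = true :=
    (isIn_singleton _ _).mpr (by simp)
  rw [hin]
  rw [takeWhile_append_all (p := fun a => !(a == '#')) pend ('#' :: l)
      (fun x hx => by simpa using hpn x hx)]
  simp only [List.takeWhile, beq_self_eq_true, Bool.not_true]
  rw [List.append_nil]
  exact rstrip_all_space pend hp

lemma lineA_cons (pend : List Char) (a : Char) (l : List Char)
    (hp : ∀ x ∈ pend, PySem.Chars.isspace x = true)
    (ha : PySem.Chars.isspace a = false) (hah : a ≠ '#') :
    lineA (pend ++ a :: l) = pend ++ a :: lineA l := by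
  have hpn : ∀ x ∈ pend, x ≠ '#' := fun x hx h => by
    subst h; exact absurd (hp _ hx) (by simp [hash_not_space])
  unfold lineA
  have hiff : PySem.Chars.isIn ['#'] (pend ++ a :: l) = PySem.Chars.isIn ['#'] l := by
    cases hb : PySem.Chars.isIn ['#'] l with
    | true =>
      exact (isIn_singleton _ _).mpr (by simp [(isIn_singleton _ _).mp hb])
    | false =>
      apply isIn_singleton_false
      intro hmem
      rcases List.mem_append.mp hmem with h | h
      · exact hpn _ h rfl
      · rcases List.mem_cons.mp h with h | h
        · exact hah h.symm
        · have := (isIn_singleton '#' l).mpr h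
          simp [hb] at this
  rw [hiff]
  cases hb : PySem.Chars.isIn ['#'] l with
  | false => simp
  | true =>
    rw [takeWhile_append_all (p := fun a => !(a == '#')) pend (a :: l)
        (fun x hx => by simpa using hpn x hx)]
    simp only [List.takeWhile]
    have hba : (!(a == '#')) = true := by simpa using hah
    rw [hba]
    exact rstrip_append_cons a ha pend _

-- the continuation parameter: tl/k is either the end of the input or a newline boundary
def ScanCont (tl k : List Char) : Prop :=
  (tl = [] ∧ k = []) ∨ (∃ r, tl = '\n' :: r ∧ k = '\n' :: scanB r [] false)

lemma scan_comment (tl k : List Char) (hk : ScanCont tl k) :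
    ∀ (l : List Char), '\n' ∉ l → ∀ pend, scanB (l ++ tl) pend true = k := by
  intro l
  induction l with
  | nil =>
    intro _ pend
    rcases hk with ⟨rfl, rfl⟩ | ⟨r, rfl, rfl⟩
    · simp [scanB]
    · simp [scanB]
  | cons a l' ih =>
    intro hnl pend
    have ha : a ≠ '\n' := fun h => hnl (by simp [h])
    simp only [List.cons_append, scanB, if_neg ha]
    exact ih (fun h => hnl (by simp [h])) pend

lemma scan_line (tl k : List Char) (hk : ScanCont tl k) :
    ∀ (l : List Char), '\n' ∉ l →
    ∀ pend, (∀ x ∈ pend, PySem.Chars.isspace x = true) →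
    scanB (l ++ tl) pend false = lineA (pend ++ l) ++ k := by
  intro l
  induction l with
  | nil =>
    intro _ pend hp
    rcases hk with ⟨rfl, rfl⟩ | ⟨r, rfl, rfl⟩
    · simp [scanB, lineA_ws pend hp]
    · simp [scanB, lineA_ws pend hp]
  | cons a l' ih =>
    intro hnl pend hp
    have ha : a ≠ '\n' := fun h => hnl (by simp [h])
    have hnl' : '\n' ∉ l' := fun h => hnl (by simp [h])
    by_cases hah : a = '#'
    · subst hah
      simp only [List.cons_append, scanB, if_neg ha]
      rw [scan_comment tl k hk l' hnl' [], lineA_hash pend l' hp]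
      simp
    · cases hsp : PySem.Chars.isspace a with
      | true =>
        simp only [List.cons_append, scanB, if_neg ha, if_neg hah, hsp]
        have := ih hnl' (pend ++ [a]) (by
          intro x hx
          rcases List.mem_append.mp hx with h | h
          · exact hp x h
          · simp at h; subst h; exact hsp)
        rw [this, List.append_assoc]
        simp
      | false =>
        simp only [List.cons_append, scanB, if_neg ha, if_neg hah, hsp]
        simp only [Bool.false_eq_true, if_false]
        rw [ih hnl' [] (by simp)]
        rw [lineA_cons pend a l' hp hsp hah]
        simp

lemma splitCh_no_mem (c : Char) (l : List Char) (h : c ∉ l) :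
    splitCh c l = [l] := by
  induction l with
  | nil => simp [splitCh]
  | cons a rest ih =>
    have ha : a ≠ c := fun hh => h (by simp [hh])
    have := ih (fun hh => h (by simp [hh]))
    simp [splitCh, ha, this]

lemma splitCh_append_cons (c : Char) (l r : List Char) (h : c ∉ l) :
    splitCh c (l ++ c :: r) = l :: splitCh c r := by
  induction l with
  | nil => simp [splitCh]
  | cons a l' ih =>
    have ha : a ≠ c := fun hh => h (by simp [hh])
    have := ih (fun hh => h (by simp [hh]))
    simp [splitCh, ha, this]

lemma exists_first_split (c : Char) (cs : List Char) (h : c ∈ cs) :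
    ∃ l r, cs = l ++ c :: r ∧ c ∉ l := by
  induction cs with
  | nil => simp at h
  | cons a rest ih =>
    by_cases hac : a = c
    · exact ⟨[], rest, by simp [hac], by simp⟩
    · have : c ∈ rest := by
        rcases List.mem_cons.mp h with h' | h'
        · exact absurd h'.symm hac
        · exact h'
      obtain ⟨l, r, rfl, hl⟩ := ih this
      exact ⟨a :: l, r, by simp, by
        intro hm
        rcases List.mem_cons.mp hm with h' | h'
        · exact hac h'.symm
        · exact hl h'⟩

lemma scan_main : ∀ (n : Nat) (cs : List Char), cs.length ≤ n →
    scanB cs [] false = PySem.Chars.join ['\n'] ((splitCh '\n' cs).map lineA) := by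
  intro n
  induction n with
  | zero =>
    intro cs hlen
    have : cs = [] := List.length_eq_zero_iff.mp (Nat.le_zero.mp hlen)
    subst this
    simp only [scanB, splitCh, List.map_cons, List.map_nil, PySem.Chars.join_singleton]
    rw [lineA_ws [] (by simp)]
    simp
  | succ m ih =>
    intro cs hlen
    by_cases hmem : '\n' ∈ cs
    · obtain ⟨l, r, rfl, hl⟩ := exists_first_split '\n' cs hmem
      have hr : r.length ≤ m := by
        have := hlen
        simp only [List.length_append, List.length_cons] at this
        omega
      have hcont : ScanCont ('\n' :: r) ('\n' :: scanB r [] false) :=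
        Or.inr ⟨r, rfl, rfl⟩
      rw [scan_line _ _ hcont l hl [] (by simp)]
      rw [splitCh_append_cons '\n' l r hl]
      rw [List.map_cons]
      have hnn := splitCh_ne_nil '\n' r
      cases hsp : splitCh '\n' r with
      | nil => exact absurd hsp hnn
      | cons h t =>
        rw [List.map_cons, PySem.Chars.join_cons_cons]
        rw [ih r hr, hsp, List.map_cons]
        simp
    · have hcont : ScanCont [] [] := Or.inl ⟨rfl, rfl⟩
      have := scan_line [] [] hcont cs hmem [] (by simp)
      simp only [List.append_nil, List.nil_append] at this
      rw [this]
      rw [splitCh_no_mem '\n' cs hmem]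
      simp [PySem.Chars.join_singleton]

-- A's folded append-loop is a map, and its per-line body is lineA
lemma portA_eq (text : String) :
    remove_comments_and_leading_spaces text =
      String.ofList (PySem.Chars.join ['\n'] ((splitCh '\n' text.toList).map lineA)) := by
  unfold remove_comments_and_leading_spaces
  simp only [PySem.List.foldl_append_singleton_eq_map, splitOn_eq_splitCh, headI_splitCh]
  rfl

-- ===== VERDICT (by name: the statement is the Claim_ definition above) =====
theorem remove_comments_and_leading_spaces_spec : Claim_equal_remove_comments_and_leading_spaces := by
  intro text _
  unfold Spec_remove_comments_and_leading_spaces remove_comments_and_leading_spaces_alt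
  rw [portA_eq, scan_main text.toList.length text.toList le_rfl]
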